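-- pv_equiv track=rewrite | github.com/tomctang/jonny | PE_Informatics/PE_pre_running.py | triangular_seq
-- ===== SOURCE A (Python) =====
-- def triangular_seq(num):
--     n=1
--     seq=[]
--     add=2
--     while len(seq)<num:
--         seq.append(n)
--         n+=add
--         add+=1
--     return seq
-- ===== SOURCE B (Python) =====
-- def triangular_seq(num):
--     return [(i + 1) * (i + 2) // 2 for i in range(num)]
-- ===== Notes on version B (the rewrite author's own statement) =====
-- stated objective: idiomatic
-- what changed: Replaces the while-loop that threads the running value n and increment add with a comprehension computing each triangular number independently from its index via the closed form (i+1)*(i+2)//2.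
import Mathlib
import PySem

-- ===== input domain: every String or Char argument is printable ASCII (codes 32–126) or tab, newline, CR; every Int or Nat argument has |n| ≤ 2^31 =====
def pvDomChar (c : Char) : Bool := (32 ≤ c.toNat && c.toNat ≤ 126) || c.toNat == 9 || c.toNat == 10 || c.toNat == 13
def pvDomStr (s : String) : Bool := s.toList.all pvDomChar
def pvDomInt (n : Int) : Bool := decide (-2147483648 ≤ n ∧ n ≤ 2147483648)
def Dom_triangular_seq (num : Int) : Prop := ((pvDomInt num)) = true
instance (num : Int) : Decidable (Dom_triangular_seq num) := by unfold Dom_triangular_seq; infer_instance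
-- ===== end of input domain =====

-- B replaces A's while-loop (threading running state n, add) with a comprehension
-- computing each element from its index by the closed form (i+1)*(i+2)//2 (idiomatic).

-- ===== PORT A =====
-- the while-loop 'while len(seq) < num: seq.append(n); n += add; add += 1',
-- with fuel = num.toNat, an upper bound on the number of iterations (structural recursion);
-- the Python list 'seq' is an Array (append = push, O(1) like Python's list.append)
def triangular_seq_loop : Nat → Int → Int → Array Int → Int → Array Int
  | 0, _, _, seq, _ => seq
  | fuel + 1, num, n, seq, add =>
    if (seq.size : Int) < num then
      triangular_seq_loop fuel num (n + add) (seq.push n) (add + 1)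
    else seq

def triangular_seq (num : Int) : List Int :=
  (triangular_seq_loop num.toNat num 1 #[] 2).toList

-- ===== PORT B =====
def triangular_seq_alt (num : Int) : List Int :=
  (PySem.List.pyRange 0 num 1).map (fun i => PySem.Int.floordiv ((i + 1) * (i + 2)) 2)

-- ===== PRECONDITION & SPEC =====
def Spec_triangular_seq (num : Int) (out : List Int) : Prop := out = triangular_seq_alt num
instance (num : Int) (out : List Int) : Decidable (Spec_triangular_seq num out) := by unfold Spec_triangular_seq; infer_instance

-- ===== CLAIM (what is proved, stated in full; the proofs are below) =====
def Claim_equal_triangular_seq : Prop := ∀ (num : Int), Dom_triangular_seq num → Spec_triangular_seq num (triangular_seq num)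

-- ===== LEMMAS AND PROOFS =====

-- the k-th triangular value B produces: ((k+1)(k+2)) // 2
def triVal (i : Int) : Int := PySem.Int.floordiv ((i + 1) * (i + 2)) 2

lemma triVal_succ (i : Int) : triVal (i + 1) = triVal i + (i + 2) := by
  unfold triVal
  rw [PySem.Int.floordiv_eq_ediv_of_pos (by norm_num),
      PySem.Int.floordiv_eq_ediv_of_pos (by norm_num)]
  have h2 : 2 ∣ (i + 1) * (i + 2) := by
    have h := (Int.even_mul_succ_self (i + 1)).two_dvd
    have he : (i + 1) * (i + 1 + 1) = (i + 1) * (i + 2) := by ring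
    rwa [he] at h
  have h3 : (i + 1 + 1) * (i + 1 + 2) = (i + 1) * (i + 2) + 2 * (i + 2) := by ring
  omega

-- loop invariant: entering the loop with seq of length L, n = triVal L, add = L + 2
lemma loop_spec (num : Int) : ∀ (m : Nat) (seq : Array Int),
    m = (num - seq.size).toNat →
    (triangular_seq_loop m num (triVal seq.size) seq ((seq.size : Int) + 2)).toList
      = seq.toList ++ (List.range m).map (fun (k : Nat) => triVal ((seq.size : Int) + (k : Int))) := by
  intro m
  induction m with
  | zero =>
    intro seq h
    simp [triangular_seq_loop]
  | succ m ih =>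
    intro seq h
    rw [triangular_seq_loop, if_pos (by omega)]
    have hlen : (((seq.push (triVal seq.size)).size : Int)) = (seq.size : Int) + 1 := by
      simp
    have harg1 : triVal (seq.size : Int) + ((seq.size : Int) + 2)
        = triVal ((seq.push (triVal seq.size)).size : Int) := by
      rw [hlen, triVal_succ]
    have harg2 : ((seq.size : Int) + 2) + 1 = ((seq.push (triVal seq.size)).size : Int) + 2 := by
      rw [hlen]; ring
    rw [harg1, harg2, ih (seq.push (triVal seq.size)) (by simp at hlen ⊢; omega)]
    rw [Array.toList_push, List.append_assoc]
    congr 1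
    have : (List.range (m + 1)).map (fun (k : Nat) => triVal ((seq.size : Int) + (k : Int)))
        = triVal ((seq.size : Int) + 0)
          :: (List.range m).map (fun (k : Nat) => triVal ((seq.size : Int) + ((k : Int) + 1))) := by
      rw [List.range_succ_eq_map]
      simp [Function.comp]
    rw [this]
    simp
    intro a _
    congr 1
    ring

lemma alt_eq (num : Int) :
    triangular_seq_alt num = (List.range num.toNat).map (fun (k : Nat) => triVal (k : Int)) := by
  unfold triangular_seq_alt triVal
  rw [PySem.List.pyRange_one]
  rw [List.map_map]
  simp [Function.comp]

-- ===== VERDICT (by name: the statement is the Claim_ definition above) =====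
theorem triangular_seq_spec : Claim_equal_triangular_seq := by
  intro num _
  unfold Spec_triangular_seq triangular_seq
  have h0 : triVal 0 = 1 := by decide
  have := loop_spec num num.toNat #[] (by simp)
  simp only [Array.size_empty, Int.natCast_zero] at this
  rw [h0] at this
  norm_num at this
  rw [this, alt_eq]
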